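-- pv_equiv track=rewrite | github.com/yenru0/CodeObjecct | zeta_python/completed/26152.py | solve
-- ===== SOURCE A (Python) =====
-- from bisect import bisect_left
--
-- def solve(N, A, B, Q, W):
--     S = []
--     before = 100000000000000000000
--     for i, ab in enumerate(zip(A, B)):
--         now = ab[0] - ab[1]
--         if now > before:
--             continue
--         elif now == before:
--             S.append((now, i + 1))
--         else:
--             S.append((now, i + 1))
--             before = now
--
--     R = []
--     rS = S[::-1]
--
--     for w in W:
--         pos = bisect_left(rS, w, key=lambda x: x[0])
--         if len(S) <= pos:
--             R.append(0)
--             continue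
--         if rS[pos][0] == w:
--             if pos == 0:
--                 R.append(N)
--             else:
--                 R.append(rS[pos - 1][1] - 1)
--         else:
--             if pos == 0:
--                 R.append(N)
--             else:
--                 R.append(rS[pos - 1][1] - 1)
--     return R
-- ===== SOURCE B (Python) =====
-- def solve(N, A, B, Q, W):
--     # Keep the running-minimum entries (value, 1-based index); values are non-increasing.
--     S = []
--     before = None
--     for i in range(min(len(A), len(B))):
--         now = A[i] - B[i]
--         if before is None or now <= before:
--             S.append((now, i + 1))
--             before = now
--     # For each query, find the first kept entry whose value is strictly below w.
--     R = []
--     for w in W: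
--         k = next((j for j, (v, _) in enumerate(S) if v < w), len(S))
--         if S and k == len(S):
--             R.append(N)          # no kept value is below w
--         elif k == 0:
--             R.append(0)          # every kept value (possibly none) is below w
--         else:
--             R.append(S[k][1] - 1)
--     return R
-- ===== Notes on version B (the rewrite author's own statement) =====
-- stated objective: simpler
-- what changed: B collapses A's three-branch stack builder into one running-minimum condition and answers each query by a direct first-match linear scan of the monotone list S instead of reversing S and binary-searching it, mapping the first index with value < w straight to 0/N/S[k][1]-1.
import Mathlib
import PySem

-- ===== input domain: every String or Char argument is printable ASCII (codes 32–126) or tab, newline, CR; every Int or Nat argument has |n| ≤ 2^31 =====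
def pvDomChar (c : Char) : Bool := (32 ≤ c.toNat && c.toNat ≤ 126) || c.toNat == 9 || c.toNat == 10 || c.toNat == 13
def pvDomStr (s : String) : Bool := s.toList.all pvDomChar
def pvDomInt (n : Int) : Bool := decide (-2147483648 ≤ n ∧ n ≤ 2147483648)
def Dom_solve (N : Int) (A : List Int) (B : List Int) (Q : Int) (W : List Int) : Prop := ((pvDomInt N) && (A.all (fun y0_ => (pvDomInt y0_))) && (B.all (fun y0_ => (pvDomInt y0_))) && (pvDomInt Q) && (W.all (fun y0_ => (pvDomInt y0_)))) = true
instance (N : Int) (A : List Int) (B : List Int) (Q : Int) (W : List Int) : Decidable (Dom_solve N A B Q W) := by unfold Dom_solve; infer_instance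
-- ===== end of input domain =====

-- B replaces A's reverse-and-binary-search query answering by a direct first-match scan of the
-- monotone list S (objective: simpler; not faster).

-- ===== PORT A =====
-- A's S-building loop over enumerate(zip(A, B)) with its three branches and sentinel `before`.
def solveBuildS : List (Int × Int) → Int → Int → List (Int × Int)
  | [], _, _ => []
  | (a, b) :: rest, i, before =>
    if a - b > before then solveBuildS rest (i + 1) before
    else if a - b = before then (a - b, i + 1) :: solveBuildS rest (i + 1) before
    else (a - b, i + 1) :: solveBuildS rest (i + 1) (a - b)

-- CPython's bisect_left(rS, w, key=λx. x[0]): lo/hi binary search loop;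
-- the while-loop runs on fuel hi - lo, which bounds its iteration count.
def solveBisectGo (rS : List (Int × Int)) (w : Int) : Nat → Nat → Nat → Nat
  | 0, lo, _ => lo
  | fuel + 1, lo, hi =>
    if lo < hi then
      if (rS.getD ((lo + hi) / 2) (0, 0)).1 < w then solveBisectGo rS w fuel ((lo + hi) / 2 + 1) hi
      else solveBisectGo rS w fuel lo ((lo + hi) / 2)
    else lo

def solveBisect (rS : List (Int × Int)) (w : Int) (lo hi : Nat) : Nat :=
  solveBisectGo rS w (hi - lo) lo hi

def solve (N : Int) (A : List Int) (B : List Int) (Q : Int) (W : List Int) : List Int :=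
  let S := solveBuildS (A.zip B) 0 100000000000000000000
  let rS := (PySem.List.slice? S none none (-1)).getD []   -- S[::-1]
  W.foldl (fun R w =>
    let pos := solveBisect rS w 0 rS.length
    if S.length ≤ pos then R ++ [0]
    else if (rS.getD pos (0, 0)).1 = w then      -- rS[pos]: in range, guarded by the line above
      (if pos = 0 then R ++ [N] else R ++ [(rS.getD (pos - 1) (0, 0)).2 - 1])
    else
      (if pos = 0 then R ++ [N] else R ++ [(rS.getD (pos - 1) (0, 0)).2 - 1])) []

-- ===== PORT B =====
-- B's single-branch S builder (before : Option Int, updated on every append).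
def altBuildS : List (Int × Int) → Int → Option Int → List (Int × Int)
  | [], _, _ => []
  | (a, b) :: rest, i, before =>
    match before with
    | none => (a - b, i + 1) :: altBuildS rest (i + 1) (some (a - b))
    | some bf =>
      if a - b ≤ bf then (a - b, i + 1) :: altBuildS rest (i + 1) (some (a - b))
      else altBuildS rest (i + 1) (some bf)

def solve_alt (N : Int) (A : List Int) (B : List Int) (Q : Int) (W : List Int) : List Int :=
  let S := altBuildS (A.zip B) 0 none
  W.map (fun w =>
    let k := S.findIdx (fun p => p.1 < w)     -- first kept entry strictly below w
    if S ≠ [] ∧ k = S.length then N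
    else if k = 0 then 0
    else (S.getD k (0, 0)).2 - 1)

-- ===== PRECONDITION & SPEC =====
def Spec_solve (N : Int) (A : List Int) (B : List Int) (Q : Int) (W : List Int) (out : List Int) : Prop := out = solve_alt N A B Q W
instance (N : Int) (A : List Int) (B : List Int) (Q : Int) (W : List Int) (out : List Int) : Decidable (Spec_solve N A B Q W out) := by unfold Spec_solve; infer_instance

-- ===== CLAIM (what is proved, stated in full; the proofs are below) =====
def Claim_equal_solve : Prop := ∀ (N : Int) (A : List Int) (B : List Int) (Q : Int) (W : List Int), Dom_solve N A B Q W → Spec_solve N A B Q W (solve N A B Q W)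

-- ===== LEMMAS AND PROOFS =====

-- A's answer for one query, read off S.reverse via the binary search.
def queryA (N : Int) (S : List (Int × Int)) (w : Int) : Int :=
  if S.length ≤ solveBisect S.reverse w 0 S.reverse.length then (0 : Int)
  else if (S.reverse.getD (solveBisect S.reverse w 0 S.reverse.length) (0, 0)).1 = w then
    (if solveBisect S.reverse w 0 S.reverse.length = 0 then N
     else (S.reverse.getD (solveBisect S.reverse w 0 S.reverse.length - 1) (0, 0)).2 - 1)
  else
    (if solveBisect S.reverse w 0 S.reverse.length = 0 then N
     else (S.reverse.getD (solveBisect S.reverse w 0 S.reverse.length - 1) (0, 0)).2 - 1)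

-- B's answer for one query.
def queryB (N : Int) (S : List (Int × Int)) (w : Int) : Int :=
  if S ≠ [] ∧ S.findIdx (fun p => p.1 < w) = S.length then N
  else if S.findIdx (fun p => p.1 < w) = 0 then 0
  else (S.getD (S.findIdx (fun p => p.1 < w)) (0, 0)).2 - 1

-- The two S builders agree once `before` is set (A's three branches collapse to B's one).
theorem buildS_some (l : List (Int × Int)) : ∀ (i bf : Int),
    solveBuildS l i bf = altBuildS l i (some bf) := by
  induction l with
  | nil => intro i bf; rfl
  | cons hd tl ih =>
    intro i bf
    obtain ⟨a, b⟩ := hd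
    simp only [solveBuildS, altBuildS]
    by_cases h1 : a - b > bf
    · rw [if_pos h1, if_neg (by omega : ¬ a - b ≤ bf)]
      exact ih _ _
    · rw [if_neg h1, if_pos (by omega : a - b ≤ bf)]
      by_cases h2 : a - b = bf
      · rw [if_pos h2, h2]
        exact congrArg _ (ih _ _)
      · rw [if_neg h2]
        exact congrArg _ (ih _ _)

-- With Dom's bounds, A's sentinel is never exceeded, so the whole builds agree.
theorem buildS_eq (l : List (Int × Int)) (i : Int)
    (h : ∀ p ∈ l, p.1 - p.2 ≤ (100000000000000000000 : Int)) :
    solveBuildS l i 100000000000000000000 = altBuildS l i none := by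
  cases l with
  | nil => rfl
  | cons hd tl =>
    obtain ⟨a, b⟩ := hd
    have hb : a - b ≤ (100000000000000000000 : Int) := h (a, b) (by simp)
    simp only [solveBuildS, altBuildS]
    rw [if_neg (by omega : ¬ a - b > (100000000000000000000 : Int))]
    by_cases h2 : a - b = (100000000000000000000 : Int)
    · rw [if_pos h2, h2]
      exact congrArg _ (buildS_some _ _ _)
    · rw [if_neg h2]
      exact congrArg _ (buildS_some _ _ _)

-- S is non-increasing in its first components, all bounded by `bf` in the `some` case.
theorem altBuildS_bounded (l : List (Int × Int)) : ∀ (i bf : Int),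
    ∀ p ∈ altBuildS l i (some bf), p.1 ≤ bf := by
  induction l with
  | nil => intro i bf p hp; simp [altBuildS] at hp
  | cons hd tl ih =>
    intro i bf p hp
    obtain ⟨a, b⟩ := hd
    simp only [altBuildS] at hp
    by_cases h : a - b ≤ bf
    · rw [if_pos h] at hp
      rcases List.mem_cons.mp hp with h1 | h1
      · simp [h1]; omega
      · have := ih (i + 1) (a - b) p h1; omega
    · rw [if_neg h] at hp; exact ih (i + 1) bf p hp

theorem altBuildS_sorted_some (l : List (Int × Int)) : ∀ (i bf : Int),
    List.Pairwise (fun p q : Int × Int => q.1 ≤ p.1) (altBuildS l i (some bf)) := by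
  induction l with
  | nil => intro i bf; simp [altBuildS]
  | cons hd tl ih =>
    intro i bf
    obtain ⟨a, b⟩ := hd
    simp only [altBuildS]
    by_cases h : a - b ≤ bf
    · rw [if_pos h]
      exact List.pairwise_cons.mpr ⟨fun q hq => altBuildS_bounded tl (i+1) (a-b) q hq, ih _ _⟩
    · rw [if_neg h]; exact ih _ _

theorem altBuildS_sorted (l : List (Int × Int)) (i : Int) :
    List.Pairwise (fun p q : Int × Int => q.1 ≤ p.1) (altBuildS l i none) := by
  cases l with
  | nil => simp [altBuildS]
  | cons hd tl =>
    obtain ⟨a, b⟩ := hd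
    simp only [altBuildS]
    exact List.pairwise_cons.mpr ⟨fun q hq => altBuildS_bounded tl (i+1) (a-b) q hq,
      altBuildS_sorted_some _ _ _⟩

-- Characterisation of k = findIdx (·.1 < w) on a non-increasing list:
-- entries strictly below w are exactly the indices ≥ k.
theorem findIdx_char (S : List (Int × Int)) (w : Int)
    (hs : List.Pairwise (fun p q : Int × Int => q.1 ≤ p.1) S)
    (j : Nat) (hj : j < S.length) :
    (S[j].1 < w ↔ S.findIdx (fun p => decide (p.1 < w)) ≤ j) := by
  set k := S.findIdx (fun p => decide (p.1 < w)) with hk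
  constructor
  · intro h
    by_contra hlt
    have := List.not_of_lt_findIdx (p := fun p : Int × Int => decide (p.1 < w)) (xs := S)
      (by omega : j < k)
    simp at this; omega
  · intro h
    have hkl : k < S.length := by omega
    have hpk : S[k].1 < w := by
      have := List.findIdx_getElem (p := fun p : Int × Int => decide (p.1 < w)) (xs := S)
        (w := hkl)
      simpa using this
    rcases Nat.eq_or_lt_of_le h with he | hlt
    · simpa [← he] using hpk
    · have := List.pairwise_iff_getElem.mp hs k j hkl hj hlt
      omega

-- Binary search correctness: if the "< w" entries are exactly the indices < t,
-- and lo ≤ t ≤ hi, the search returns t.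
theorem bisect_correct (rS : List (Int × Int)) (w : Int) (t : Nat)
    (hchar : ∀ j, j < rS.length → ((rS.getD j (0,0)).1 < w ↔ j < t)) :
    ∀ fuel lo hi, hi ≤ rS.length → hi - lo ≤ fuel → lo ≤ t → t ≤ hi →
      solveBisectGo rS w fuel lo hi = t := by
  intro fuel
  induction fuel with
  | zero =>
    intro lo hi _ hfl hlo hth
    simp only [solveBisectGo]
    omega
  | succ n ih =>
    intro lo hi hhi hfl hlo hth
    simp only [solveBisectGo]
    by_cases h : lo < hi
    · rw [if_pos h]
      by_cases hm : (rS.getD ((lo + hi) / 2) (0,0)).1 < w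
      · rw [if_pos hm]
        have hmt : (lo + hi) / 2 < t := by
          have := hchar ((lo + hi) / 2) (by omega)
          omega
        exact ih _ _ hhi (by omega) (by omega) hth
      · rw [if_neg hm]
        have hmt : t ≤ (lo + hi) / 2 := by
          by_contra hc
          have := hchar ((lo + hi) / 2) (by omega)
          omega
        exact ih _ _ (by omega) (by omega) hlo hmt
    · rw [if_neg h]; omega

-- Indexing S.reverse against S.
theorem getD_reverse (S : List (Int × Int)) (j : Nat) (hj : j < S.length) :
    S.reverse.getD j (0,0) = S[S.length - 1 - j] := by
  rw [List.getD_eq_getElem S.reverse (0,0) (by simpa using hj)]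
  rw [List.getElem_reverse]

-- foldl with per-element append is map.
theorem foldl_append_map {α β : Type} (f : α → β) (l : List α) :
    ∀ (acc : List β), l.foldl (fun R w => R ++ [f w]) acc = acc ++ l.map f := by
  induction l with
  | nil => intro acc; simp
  | cons hd tl ih => intro acc; simp [List.foldl_cons, ih]

-- Per-query agreement.
theorem query_eq (N : Int) (S : List (Int × Int)) (w : Int)
    (hs : List.Pairwise (fun p q : Int × Int => q.1 ≤ p.1) S) :
    queryA N S w = queryB N S w := by
  unfold queryA queryB
  set k := S.findIdx (fun p => decide (p.1 < w)) with hkdef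
  have hkle : k ≤ S.length := List.findIdx_le_length
  have hchar : ∀ j, j < S.reverse.length →
      ((S.reverse.getD j (0,0)).1 < w ↔ j < S.length - k) := by
    intro j hj
    rw [List.length_reverse] at hj
    rw [getD_reverse S j hj]
    rw [findIdx_char S w hs (S.length - 1 - j) (by omega)]
    omega
  have hpos : solveBisect S.reverse w 0 S.reverse.length = S.length - k := by
    unfold solveBisect
    exact bisect_correct S.reverse w (S.length - k) hchar _ 0 S.reverse.length
      (le_refl _) (by omega) (by omega) (by rw [List.length_reverse]; omega)
  rw [hpos]
  by_cases hk0 : k = 0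
  · rw [if_pos (show S.length ≤ S.length - k by omega)]
    rcases eq_or_ne S [] with hnil | hnil
    · subst hnil; simp [hk0]
    · have hlen : S.length ≠ 0 := by simpa [List.length_eq_zero_iff] using hnil
      rw [if_neg (show ¬ (S ≠ [] ∧ k = S.length) from by
            intro hc; exact absurd hc.2 (by omega)),
          if_pos (show k = 0 from hk0)]
  · by_cases hkl : k = S.length
    · have hnil : S ≠ [] := by
        intro h; apply hk0; rw [hkdef, h]; rfl
      have hp0 : S.length - k = 0 := by omega
      rw [hp0, if_neg (show ¬ S.length ≤ 0 by omega),
          if_pos (show (S ≠ [] ∧ k = S.length) from ⟨hnil, hkl⟩)]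
      split <;> simp
    · have hkl' : k < S.length := by omega
      have hne : S.length - k ≠ 0 := by omega
      have hprev : S.reverse.getD (S.length - k - 1) (0,0) = S[k] := by
        rw [getD_reverse S (S.length - k - 1) (by omega)]
        congr 1; omega
      have hSk : S.getD k (0,0) = S[k] := List.getD_eq_getElem S (0,0) hkl'
      rw [if_neg (show ¬ S.length ≤ S.length - k by omega),
          if_neg (show ¬ (S ≠ [] ∧ k = S.length) from fun h => hkl h.2),
          if_neg (show ¬ (k = 0) from hk0), hSk, ← hprev]
      split <;> rfl

-- ===== VERDICT (by name: the statement is the Claim_ definition above) =====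
theorem solve_spec : Claim_equal_solve := by
  intro N A B Q W hdom
  unfold Spec_solve
  simp only [solve, solve_alt]
  have hbound : ∀ p ∈ A.zip B, p.1 - p.2 ≤ (100000000000000000000 : Int) := by
    intro p hp
    obtain ⟨h1, h2⟩ := List.of_mem_zip hp
    unfold Dom_solve at hdom
    simp only [Bool.and_eq_true, List.all_eq_true] at hdom
    have ha := hdom.1.1.1.2 p.1 h1
    have hb := hdom.1.1.2 p.2 h2
    simp [pvDomInt] at ha hb
    omega
  rw [buildS_eq (A.zip B) 0 hbound]
  set S := altBuildS (A.zip B) 0 none with hS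
  have hsort : List.Pairwise (fun p q : Int × Int => q.1 ≤ p.1) S := altBuildS_sorted _ _
  rw [PySem.List.slice?_none_none_neg_one, Option.getD_some]
  have hbody : (fun (R : List Int) (w : Int) =>
      if S.length ≤ solveBisect S.reverse w 0 S.reverse.length then R ++ [(0 : Int)]
      else if (S.reverse.getD (solveBisect S.reverse w 0 S.reverse.length) (0, 0)).1 = w then
        (if solveBisect S.reverse w 0 S.reverse.length = 0 then R ++ [N]
         else R ++ [(S.reverse.getD (solveBisect S.reverse w 0 S.reverse.length - 1) (0, 0)).2 - 1])
      else
        (if solveBisect S.reverse w 0 S.reverse.length = 0 then R ++ [N]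
         else R ++ [(S.reverse.getD (solveBisect S.reverse w 0 S.reverse.length - 1) (0, 0)).2 - 1])) =
      fun R w => R ++ [queryA N S w] := by
    funext R w
    unfold queryA
    split_ifs <;> rfl
  rw [hbody, foldl_append_map, List.nil_append]
  apply List.map_congr_left
  intro w _
  exact (query_eq N S w hsort).trans rfl
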